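-- pv_equiv track=rewrite | github.com/ETE4990-S25/homeworkfolder-DrewPickett | Project #2/Project #2.py | fibonacci_calc
-- ===== SOURCE A (Python) =====
-- def fibonacci_calc(n):
--     a, b = 0, 1
--     nth_term = 0
--     while a <= n:
--         if a == n:
--             return nth_term
--         a, b = b, a + b
--         nth_term += 1
--     if abs(n - (b - a)) <= abs(n - a):
--         return nth_term - 1
--     else:
--         return nth_term
-- ===== SOURCE B (Python) =====
-- def fibonacci_calc(n):
--     pairs = []
--     a, b, i = 0, 1, 0
--     while True:
--         pairs.append((i, a))
--         if a >= n:
--             break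
--         a, b, i = b, a + b, i + 1
--     return min(pairs, key=lambda p: (abs(p[1] - n), p[0]))[0]
-- ===== Notes on version B (the rewrite author's own statement) =====
-- stated objective: alternative
-- what changed: A's single-pass two-pointer loop with a final neighbour comparison is replaced by building a table of (index, fib) pairs up to the first value >= n and returning the index of the entry minimizing the key (abs(value - n), index).
import Mathlib
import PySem

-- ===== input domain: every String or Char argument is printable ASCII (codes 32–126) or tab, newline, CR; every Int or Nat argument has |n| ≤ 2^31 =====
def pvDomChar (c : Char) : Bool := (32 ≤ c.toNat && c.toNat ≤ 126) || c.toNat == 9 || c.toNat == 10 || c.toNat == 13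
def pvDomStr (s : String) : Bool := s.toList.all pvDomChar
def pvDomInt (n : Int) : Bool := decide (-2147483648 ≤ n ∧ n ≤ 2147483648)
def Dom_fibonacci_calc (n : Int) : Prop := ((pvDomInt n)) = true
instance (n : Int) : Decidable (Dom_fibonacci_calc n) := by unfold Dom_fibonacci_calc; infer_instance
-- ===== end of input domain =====

-- B replaces A's single-pass two-pointer loop + final comparison with a table of
-- (index, fib) pairs up to the first value ≥ n followed by a min-scan on the key
-- (abs(value - n), index); objective: alternative (same cost, different shape).

-- Invariant of the Fibonacci state (a, b): holds for every reachable pair and is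
-- preserved by (a, b) ↦ (b, a + b); carried only so the loops terminate.
def FibInv (a b : Int) : Prop := (a = 0 ∧ b = 1) ∨ (a = 1 ∧ b = 1) ∨ (1 ≤ a ∧ a < b)

theorem fibInv_step {a b : Int} (h : FibInv a b) : FibInv b (a + b) := by
  rcases h with ⟨h1, h2⟩ | ⟨h1, h2⟩ | ⟨h1, h2⟩ <;> subst_vars <;> simp [FibInv] <;> omega

-- ===== PORT A =====
-- A's while-loop over the state (a, b, nth_term): exact hit returns nth_term,
-- overshoot exits into the comparison of the two neighbours b - a and a.
def fibLoopA (n a b t : Int) (h : FibInv a b) : Int :=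
  if a ≤ n then
    if a = n then t
    else fibLoopA n b (a + b) (t + 1) (fibInv_step h)
  else if |n - (b - a)| ≤ |n - a| then t - 1 else t
termination_by (2 * (n - a)).toNat + (if a < b then 0 else 1)
decreasing_by
  rcases h with ⟨h1, h2⟩ | ⟨h1, h2⟩ | ⟨h1, h2⟩ <;> subst_vars <;> split_ifs <;> omega

def fibonacci_calc (n : Int) : Int := fibLoopA n 0 1 0 (Or.inl ⟨rfl, rfl⟩)

-- ===== PORT B =====
-- B's gather loop: append (i, a); stop after appending the first value ≥ n.
def buildB (n a b i : Int) (h : FibInv a b) : List (Int × Int) :=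
  (i, a) :: (if hs : n ≤ a then [] else buildB n b (a + b) (i + 1) (fibInv_step h))
termination_by (2 * (n - a)).toNat + (if a < b then 0 else 1)
decreasing_by
  rcases h with ⟨h1, h2⟩ | ⟨h1, h2⟩ | ⟨h1, h2⟩ <;> subst_vars <;> split_ifs <;> omega

-- Python's key lambda p: (abs(p[1] - n), p[0]) and the strict lexicographic
-- comparison min performs on it (the first minimal element wins).
def bKey (n : Int) (p : Int × Int) : Int × Int := (|p.2 - n|, p.1)

def bLt (x y : Int × Int) : Bool := x.1 < y.1 || (x.1 == y.1 && x.2 < y.2)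

-- min over the pairs list = fold over the tail starting from the head,
-- replacing the best only on a strictly smaller key (Python's min semantics);
-- the [] branch is unreachable since buildB always returns a cons.
def fibonacci_calc_alt (n : Int) : Int :=
  match buildB n 0 1 0 (Or.inl ⟨rfl, rfl⟩) with
  | p :: rest => (rest.foldl (fun best q => if bLt (bKey n q) (bKey n best) then q else best) p).1
  | [] => 0

-- ===== PRECONDITION & SPEC =====
def Spec_fibonacci_calc (n : Int) (out : Int) : Prop := out = fibonacci_calc_alt n
instance (n : Int) (out : Int) : Decidable (Spec_fibonacci_calc n out) := by unfold Spec_fibonacci_calc; infer_instance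

-- ===== CLAIM (what is proved, stated in full; the proofs are below) =====
def Claim_equal_fibonacci_calc : Prop := ∀ (n : Int), Dom_fibonacci_calc n → Spec_fibonacci_calc n (fibonacci_calc n)

-- ===== LEMMAS AND PROOFS =====

def minFold (n : Int) (p : Int × Int) (L : List (Int × Int)) : Int × Int :=
  L.foldl (fun best q => if bLt (bKey n q) (bKey n best) then q else best) p

def minHead (n : Int) : List (Int × Int) → Int
  | [] => 0
  | p :: rest => (minFold n p rest).1

-- every index stored by buildB from counter i is ≥ i
theorem buildB_idx_ge (n a b i : Int) (h : FibInv a b) :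
    ∀ e ∈ buildB n a b i h, i ≤ e.1 := by
  fun_induction buildB n a b i h
  rename_i a b i hinv ih
  intro e he
  rcases List.mem_cons.mp he with rfl | he'
  · simp
  · split at he'
    · simp at he'
    · have := ih (by omega) e he'; omega

-- two inits with equal distance keys whose indices lie below every index in L:
-- if some element of L strictly beats that distance, the fold forgets the init
theorem minFold_init_irrel (n : Int) (L : List (Int × Int)) :
    ∀ (p q : Int × Int), (bKey n p).1 = (bKey n q).1 →
    (∀ e ∈ L, p.1 < e.1 ∧ q.1 < e.1) →
    (∃ e ∈ L, (bKey n e).1 < (bKey n p).1) →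
    (minFold n p L).1 = (minFold n q L).1 := by
  induction L with
  | nil => intro p q _ _ hex; simp at hex
  | cons e L ih =>
    intro p q hk hidx hex
    have hep := (hidx e (List.mem_cons_self ..)).1
    have heq := (hidx e (List.mem_cons_self ..)).2
    by_cases hlt : (bKey n e).1 < (bKey n p).1
    · have h1 : bLt (bKey n e) (bKey n p) = true := by
        simp [bLt]; omega
      have h2 : bLt (bKey n e) (bKey n q) = true := by
        simp [bLt, bKey] at *; omega
      simp only [minFold, List.foldl_cons, h1, h2, if_true]
    · have h1 : bLt (bKey n e) (bKey n p) = false := by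
        simp [bLt, bKey] at *; omega
      have h2 : bLt (bKey n e) (bKey n q) = false := by
        simp [bLt, bKey] at *; omega
      simp only [minFold, List.foldl_cons, h1, h2, if_false, Bool.false_eq_true]
      apply ih p q hk (fun x hx => hidx x (List.mem_cons_of_mem _ hx))
      rcases hex with ⟨w, hw, hwlt⟩
      rcases List.mem_cons.mp hw with rfl | hw'
      · exact absurd hwlt hlt
      · exact ⟨w, hw', hwlt⟩

-- the heart of the equivalence: from any reachable state with a ≤ n,
-- A's loop returns the index of the first key-minimal entry of B's table
theorem loop_eq_min (n a b t : Int) (h : FibInv a b) (hle : a ≤ n) :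
    fibLoopA n a b t h = minHead n (buildB n a b t h) := by
  fun_induction fibLoopA n a b t h
  case case3 => omega
  case case4 => omega
  case case1 =>
    rw [buildB]
    simp [minHead, minFold]
  case case2 =>
    rename_i a b t hinv han hne ih
    have haltn : a < n := by omega
    rw [buildB]
    simp only [show ¬ n ≤ a from by omega, dite_false]
    rw [buildB]
    by_cases hbn : b ≤ n
    · -- keep going: the tail still holds values at or below n
      have hIH := ih hbn
      rw [buildB] at hIH
      by_cases hab : a < b
      · -- the new head strictly beats (t, a): the fold forgets (t, a)
        have hstep : bLt (bKey n (t + 1, b)) (bKey n (t, a)) = true := by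
          simp [bLt, bKey]
          have h1 : |b - n| = n - b := by rw [abs_of_nonpos] <;> omega
          have h2 : |a - n| = n - a := by rw [abs_of_nonpos] <;> omega
          omega
        simp only [minHead, minFold, List.foldl_cons, hstep, if_true] at hIH ⊢
        exact hIH
      · -- a = b, hence a = b = 1 (FibInv): equal distance, earlier index kept;
        -- a later entry beats both inits, so the fold ignores which one starts
        have hab1 : a = 1 ∧ b = 1 := by
          rcases hinv with ⟨h1, h2⟩ | ⟨h1, h2⟩ | ⟨h1, h2⟩ <;> omega
        obtain ⟨rfl, rfl⟩ := hab1
        have hn2 : 2 ≤ n := by omega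
        have hstep : bLt (bKey n (t + 1, (1:Int))) (bKey n (t, (1:Int))) = false := by
          simp [bLt, bKey]
        simp only [minHead, minFold, List.foldl_cons, hstep, if_false, Bool.false_eq_true] at hIH ⊢
        rw [hIH]
        have hrest : ¬ n ≤ (1:Int) := by omega
        simp only [hrest, dite_false]
        apply minFold_init_irrel
        · rfl
        · intro e he
          have := buildB_idx_ge n (1 + 1) (1 + (1 + 1)) (t + 1 + 1) (fibInv_step (fibInv_step hinv)) e he
          constructor <;> omega
        · refine ⟨(t + 1 + 1, 1 + 1), ?_, ?_⟩
          · rw [buildB]; exact List.mem_cons_self ..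
          · simp only [bKey]
            have h1 : |1 + 1 - n| = n - 2 := by rw [abs_of_nonpos] <;> omega
            have h2 : |(1:Int) - n| = n - 1 := by rw [abs_of_nonpos] <;> omega
            omega
    · -- b overshoots n: both sides are the final two-candidate comparison
      rw [fibLoopA]
      simp only [hbn, if_false]
      have hrest : n ≤ b := by omega
      simp only [hrest, dite_true]
      have h1 : |n - (a + b - b)| = n - a := by rw [abs_of_nonneg] <;> omega
      have h3 : |n - b| = b - n := by rw [abs_of_nonpos] <;> omega
      have h4 : |b - n| = b - n := by rw [abs_of_nonneg] <;> omega
      have h5 : |a - n| = n - a := by rw [abs_of_nonpos] <;> omega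
      simp only [minHead, minFold, List.foldl_cons, List.foldl_nil, bLt, bKey, h1, h3, h4, h5]
      split_ifs with c1 c2 c2 <;> simp_all <;> omega

-- ===== VERDICT (by name: the statement is the Claim_ definition above) =====
theorem fibonacci_calc_spec : Claim_equal_fibonacci_calc := by
  intro n _
  unfold Spec_fibonacci_calc fibonacci_calc fibonacci_calc_alt
  by_cases hn : 0 ≤ n
  · rw [loop_eq_min n 0 1 0 (Or.inl ⟨rfl, rfl⟩) hn]
    rw [buildB]
    rfl
  · rw [fibLoopA, buildB]
    have h1 : ¬ (0:Int) ≤ n := hn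
    have h2 : |n - (1 - 0)| = 1 - n := by rw [abs_of_nonpos] <;> omega
    have h3 : |n - 0| = -n := by rw [abs_of_nonpos] <;> omega
    simp only [h1, if_false, h2, h3, show ¬ (1 - n ≤ -n) from by omega,
      show n ≤ (0:Int) from by omega, dite_true]
    rfl
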